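-- pv_equiv track=rewrite | github.com/ArdCarraigh/Blender_SRT_Addon | io_scene_srt_json/export_srt_json.py | getAttributesComponents
-- ===== SOURCE A (Python) =====
-- def getAttributesComponents(attributes):
--     components = []
--     for i in range(len(attributes)):
--         if attributes[i] == "VERTEX_ATTRIB_UNASSIGNED":
--             components+= ["VERTEX_COMPONENT_UNASSIGNED"]
--         else:
--             n = 0
--             for j in range(len(attributes[:i])):
--                 if attributes[j] == attributes[i]:
--                     n += 1
--             if n == 0:
--                 components += ["VERTEX_COMPONENT_X"]
--             if n == 1:
--                 components += ["VERTEX_COMPONENT_Y"]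
--             if n == 2:
--                 components += ["VERTEX_COMPONENT_Z"]
--             if n == 3:
--                 components += ["VERTEX_COMPONENT_W"]
--     return(components)
-- ===== SOURCE B (Python) =====
-- def getAttributesComponents(attributes):
--     # Phase 1: group positions by attribute value (one enumerate pass).
--     positions = {}
--     for i, v in enumerate(attributes):
--         positions.setdefault(v, []).append(i)
--     # Phase 2: per group, assign a label to each position (UNASSIGNED gets a
--     # label at every occurrence; a real value only at its first 4 occurrences).
--     comps = ["VERTEX_COMPONENT_X", "VERTEX_COMPONENT_Y",
--              "VERTEX_COMPONENT_Z", "VERTEX_COMPONENT_W"]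
--     labels = {}
--     for v, idxs in positions.items():
--         if v == "VERTEX_ATTRIB_UNASSIGNED":
--             for i in idxs:
--                 labels[i] = "VERTEX_COMPONENT_UNASSIGNED"
--         else:
--             for k, i in enumerate(idxs[:4]):
--                 labels[i] = comps[k]
--     # Phase 3: emit labels in position order, skipping unlabeled positions.
--     return [labels[i] for i in range(len(attributes)) if i in labels]
-- ===== Notes on version B (the rewrite author's own statement) =====
-- stated objective: faster
-- what changed: Replaces A's per-element quadratic prefix re-scan by a three-phase group-and-emit: one pass groups positions by value into a dict, each group then assigns labels to its first occurrences (all of them for UNASSIGNED, the first four otherwise), and a final pass over positions emits the assigned labels in order.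
import Mathlib
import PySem

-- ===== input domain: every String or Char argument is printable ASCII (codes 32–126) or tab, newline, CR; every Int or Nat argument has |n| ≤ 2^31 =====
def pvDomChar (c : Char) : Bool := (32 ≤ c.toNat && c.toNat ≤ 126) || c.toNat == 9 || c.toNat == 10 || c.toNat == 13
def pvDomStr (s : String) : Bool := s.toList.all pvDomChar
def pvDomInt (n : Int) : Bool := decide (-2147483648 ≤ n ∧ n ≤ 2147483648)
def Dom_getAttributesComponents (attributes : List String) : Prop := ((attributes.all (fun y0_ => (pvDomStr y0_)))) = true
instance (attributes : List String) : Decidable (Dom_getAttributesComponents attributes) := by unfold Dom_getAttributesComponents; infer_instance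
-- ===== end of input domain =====

-- B replaces A's per-element quadratic prefix re-scan by a three-phase group-and-emit
-- (group positions by value, label each group's occurrences, emit in position order); objective: faster.

-- ===== PORT A =====
-- literal port: outer loop over range(len(attributes)); inner loop counts equal elements in attributes[:i]
def getAttributesComponents (attributes : List String) : List String :=
  (List.range attributes.length).foldl (fun components i =>
    if attributes.getD i "" = "VERTEX_ATTRIB_UNASSIGNED" then
      components ++ ["VERTEX_COMPONENT_UNASSIGNED"]
    else
      let n := (List.range (attributes.take i).length).foldl
        (fun n j => if attributes.getD j "" = attributes.getD i "" then n + 1 else n) 0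
      let c1 := if n = 0 then components ++ ["VERTEX_COMPONENT_X"] else components
      let c2 := if n = 1 then c1 ++ ["VERTEX_COMPONENT_Y"] else c1
      let c3 := if n = 2 then c2 ++ ["VERTEX_COMPONENT_Z"] else c2
      if n = 3 then c3 ++ ["VERTEX_COMPONENT_W"] else c3) []

-- ===== PORT B =====
-- literal port of Source B: phase 1 groups positions by value into a dict, phase 2 assigns a
-- label per occurrence inside each group, phase 3 emits the labels in position order
def getAttributesComponents_alt (attributes : List String) : List String :=
  let positions : PySem.Dict String (List Int) :=
    (PySem.List.enumerate attributes 0).foldl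
      (fun d p => d.modify p.2 [] (fun old => old ++ [p.1])) PySem.Dict.empty
  let comps := ["VERTEX_COMPONENT_X", "VERTEX_COMPONENT_Y",
                "VERTEX_COMPONENT_Z", "VERTEX_COMPONENT_W"]
  let labels : PySem.Dict Int String :=
    positions.items.foldl
      (fun lab g =>
        if g.1 = "VERTEX_ATTRIB_UNASSIGNED" then
          g.2.foldl (fun lab i => lab.insert i "VERTEX_COMPONENT_UNASSIGNED") lab
        else
          (PySem.List.enumerate (g.2.take 4) 0).foldl
            (fun lab q => lab.insert q.2 (PySem.List.pyGetD comps q.1 "")) lab)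
      PySem.Dict.empty
  ((PySem.List.pyRange 0 (attributes.length : Int) 1).filter
      (fun i => labels.contains i)).map (fun i => labels.getD i "")

-- ===== PRECONDITION & SPEC =====
def Spec_getAttributesComponents (attributes : List String) (out : List String) : Prop := out = getAttributesComponents_alt attributes
instance (attributes : List String) (out : List String) : Decidable (Spec_getAttributesComponents attributes out) := by unfold Spec_getAttributesComponents; infer_instance

-- ===== CLAIM (what is proved, stated in full; the proofs are below) =====
def Claim_equal_getAttributesComponents : Prop := ∀ (attributes : List String), Dom_getAttributesComponents attributes → Spec_getAttributesComponents attributes (getAttributesComponents attributes)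

-- ===== LEMMAS AND PROOFS =====

def pvComps : List String :=
  ["VERTEX_COMPONENT_X", "VERTEX_COMPONENT_Y", "VERTEX_COMPONENT_Z", "VERTEX_COMPONENT_W"]

-- the label (if any) position k receives
def pvLab (l : List String) (k : Nat) : Option String :=
  if l.getD k "" = "VERTEX_ATTRIB_UNASSIGNED" then some "VERTEX_COMPONENT_UNASSIGNED"
  else if (l.take k).count (l.getD k "") < 4 then
    some (pvComps.getD ((l.take k).count (l.getD k "")) "") else none

-- occurrence positions of v, as B's phase 1 produces them (Int) and as Nats
def pvOcc (l : List String) (v : String) : List Int :=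
  ((PySem.List.enumerate l 0).filter (fun q => q.2 == v)).map (fun q => q.1)

def pvOccN (l : List String) (v : String) : List Nat :=
  (List.range l.length).filter (fun k => l.getD k "" == v)

-- the (at most one) label A emits for a value seen n times before
def pvEseq (n : Nat) : List String :=
  (if n = 0 then ["VERTEX_COMPONENT_X"] else []) ++
  (if n = 1 then ["VERTEX_COMPONENT_Y"] else []) ++
  (if n = 2 then ["VERTEX_COMPONENT_Z"] else []) ++
  (if n = 3 then ["VERTEX_COMPONENT_W"] else [])

def pvEmit (n : Nat) (v : String) : List String :=
  if v = "VERTEX_ATTRIB_UNASSIGNED" then ["VERTEX_COMPONENT_UNASSIGNED"] else pvEseq n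

theorem pvEseq_eq_table (n : Nat) :
    pvEseq n = (if n < 4 then [pvComps.getD n ""] else []) := by
  match n with
  | 0 => rfl
  | 1 => rfl
  | 2 => rfl
  | 3 => rfl
  | (m+4) => simp [pvEseq]

theorem pvChain_eq (acc : List String) (n : Nat) :
    (let c1 := if n = 0 then acc ++ ["VERTEX_COMPONENT_X"] else acc
     let c2 := if n = 1 then c1 ++ ["VERTEX_COMPONENT_Y"] else c1
     let c3 := if n = 2 then c2 ++ ["VERTEX_COMPONENT_Z"] else c2
     if n = 3 then c3 ++ ["VERTEX_COMPONENT_W"] else c3) = acc ++ pvEseq n := by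
  simp only [pvEseq]
  split_ifs <;> simp_all

theorem pvCountFold (l : List String) (a : String) :
    ∀ (m : Nat), m ≤ l.length → ∀ (c : Nat),
      (List.range m).foldl (fun n j => if l.getD j "" = a then n + 1 else n) c
        = c + (l.take m).count a := by
  intro m
  induction m with
  | zero => intro _ c; simp
  | succ m ih =>
    intro hm c
    have hml : m < l.length := by omega
    rw [List.range_succ, List.foldl_append, ih (by omega)]
    have htake : l.take (m + 1) = l.take m ++ [l[m]] := by
      rw [List.take_add_one]
      simp [List.getElem?_eq_getElem hml]
    have hgetD : l.getD m "" = l[m] := by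
      simp [List.getD_eq_getElem?_getD, List.getElem?_eq_getElem hml]
    rw [htake]
    simp only [List.foldl_cons, List.foldl_nil, hgetD, List.count_append]
    by_cases h : l[m] = a
    · simp [h]
      omega
    · simp [h]

theorem pvA_snoc (l : List String) (x : String) :
    getAttributesComponents (l ++ [x])
      = getAttributesComponents l ++ pvEmit (l.count x) x := by
  unfold getAttributesComponents
  have hlen : (l ++ [x]).length = l.length + 1 := by simp
  rw [hlen, List.range_succ, List.foldl_append]
  have hcongr : ∀ (acc : List String),
      (List.range l.length).foldl (fun components i =>
        if (l ++ [x]).getD i "" = "VERTEX_ATTRIB_UNASSIGNED" then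
          components ++ ["VERTEX_COMPONENT_UNASSIGNED"]
        else
          let n := (List.range ((l ++ [x]).take i).length).foldl
            (fun n j => if (l ++ [x]).getD j "" = (l ++ [x]).getD i "" then n + 1 else n) 0
          let c1 := if n = 0 then components ++ ["VERTEX_COMPONENT_X"] else components
          let c2 := if n = 1 then c1 ++ ["VERTEX_COMPONENT_Y"] else c1
          let c3 := if n = 2 then c2 ++ ["VERTEX_COMPONENT_Z"] else c2
          if n = 3 then c3 ++ ["VERTEX_COMPONENT_W"] else c3) acc
      = (List.range l.length).foldl (fun components i =>
        if l.getD i "" = "VERTEX_ATTRIB_UNASSIGNED" then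
          components ++ ["VERTEX_COMPONENT_UNASSIGNED"]
        else
          let n := (List.range (l.take i).length).foldl
            (fun n j => if l.getD j "" = l.getD i "" then n + 1 else n) 0
          let c1 := if n = 0 then components ++ ["VERTEX_COMPONENT_X"] else components
          let c2 := if n = 1 then c1 ++ ["VERTEX_COMPONENT_Y"] else c1
          let c3 := if n = 2 then c2 ++ ["VERTEX_COMPONENT_Z"] else c2
          if n = 3 then c3 ++ ["VERTEX_COMPONENT_W"] else c3) acc := by
    intro acc
    apply PySem.List.foldl_congr_mem
    intro b i hi
    have hi' : i < l.length := List.mem_range.mp hi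
    have hgd : ∀ j, j < l.length → (l ++ [x]).getD j "" = l.getD j "" := by
      intro j hj
      simp [List.getD_eq_getElem?_getD, List.getElem?_append_left hj]
    have htk : (l ++ [x]).take i = l.take i := List.take_append_of_le_length (by omega)
    have hcnt : (List.range ((l ++ [x]).take i).length).foldl
        (fun n j => if (l ++ [x]).getD j "" = (l ++ [x]).getD i "" then n + 1 else n) 0
        = (List.range (l.take i).length).foldl
        (fun n j => if l.getD j "" = l.getD i "" then n + 1 else n) 0 := by
      rw [htk]
      apply PySem.List.foldl_congr_mem
      intro n j hj
      have hj' : j < (l.take i).length := List.mem_range.mp hj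
      have hjl : j < l.length := by
        have := List.length_take_le i l; omega
      rw [hgd j hjl, hgd i hi']
    rw [hcnt, hgd i hi']
  rw [hcongr]
  have hgx : (l ++ [x]).getD l.length "" = x := by
    simp [List.getD_eq_getElem?_getD]
  have htkl : (l ++ [x]).take l.length = l := by
    simp [List.take_append_of_le_length (l₂ := [x]) (le_refl l.length)]
  simp only [List.foldl_cons, List.foldl_nil, hgx, htkl]
  by_cases hx : x = "VERTEX_ATTRIB_UNASSIGNED"
  · simp [hx, pvEmit]
  · have hcnt : (List.range l.length).foldl
        (fun n j => if (l ++ [x]).getD j "" = x then n + 1 else n) 0 = l.count x := by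
      have := pvCountFold (l ++ [x]) x l.length (by simp) 0
      rw [htkl] at this
      simpa using this
    simp only [hx, if_false, hcnt, pvEmit]
    exact pvChain_eq _ _

-- pvLab is stable under appending, and at the appended position it is A's emission
theorem pvLab_append (l : List String) (x : String) (k : Nat) (hk : k < l.length) :
    pvLab (l ++ [x]) k = pvLab l k := by
  have hgd : (l ++ [x]).getD k "" = l.getD k "" := by
    simp [List.getD_eq_getElem?_getD, List.getElem?_append_left hk]
  have htk : (l ++ [x]).take k = l.take k := List.take_append_of_le_length (by omega)
  unfold pvLab
  rw [hgd, htk]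

theorem pvLab_last (l : List String) (x : String) :
    (pvLab (l ++ [x]) l.length).toList = pvEmit (l.count x) x := by
  have hgd : (l ++ [x]).getD l.length "" = x := by
    simp [List.getD_eq_getElem?_getD]
  have htk : (l ++ [x]).take l.length = l := by
    simp [List.take_append_of_le_length (l₂ := [x]) (le_refl l.length)]
  unfold pvLab pvEmit
  rw [hgd, htk]
  by_cases hx : x = "VERTEX_ATTRIB_UNASSIGNED"
  · simp [hx]
  · rw [pvEseq_eq_table]
    by_cases h4 : l.count x < 4 <;> simp [hx, h4]

-- A computes the per-position labels in order
theorem pvA_eq_filterMap (l : List String) :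
    getAttributesComponents l = (List.range l.length).filterMap (pvLab l) := by
  induction l using List.reverseRecOn with
  | nil => rfl
  | append_singleton l x ih =>
    rw [pvA_snoc, ih]
    have hlen : (l ++ [x]).length = l.length + 1 := by simp
    rw [hlen, List.range_succ, List.filterMap_append]
    have h1 : (List.range l.length).filterMap (pvLab (l ++ [x]))
        = (List.range l.length).filterMap (pvLab l) := by
      apply List.filterMap_congr
      intro k hk
      exact pvLab_append l x k (List.mem_range.mp hk)
    rw [h1]
    have h2 : [l.length].filterMap (pvLab (l ++ [x])) = pvEmit (l.count x) x := by
      rw [← pvLab_last l x]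
      cases h : pvLab (l ++ [x]) l.length <;> simp [h]
    rw [h2]

-- ===== B-side: phase 1 (grouping) =====

theorem pvOcc_snoc (l : List String) (x : String) (v : String) :
    pvOcc (l ++ [x]) v = pvOcc l v ++ (if x == v then [(l.length : Int)] else []) := by
  unfold pvOcc
  rw [show PySem.List.enumerate (l ++ [x]) 0
        = PySem.List.enumerate l 0 ++ [((l.length : Int), x)] by
      simp [PySem.List.enumerate_append, PySem.List.enumerate_cons]]
  rw [List.filter_append, List.map_append]
  by_cases hx : x == v <;> simp [hx]

theorem pvOccN_snoc (l : List String) (x : String) (v : String) :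
    pvOccN (l ++ [x]) v = pvOccN l v ++ (if x == v then [l.length] else []) := by
  unfold pvOccN
  have hlen : (l ++ [x]).length = l.length + 1 := by simp
  rw [hlen, List.range_succ, List.filter_append]
  have h1 : (List.range l.length).filter (fun k => (l ++ [x]).getD k "" == v)
      = (List.range l.length).filter (fun k => l.getD k "" == v) := by
    apply List.filter_congr
    intro k hk
    have hk' : k < l.length := List.mem_range.mp hk
    simp [List.getD_eq_getElem?_getD, List.getElem?_append_left hk']
  rw [h1]
  by_cases hx : x == v <;> simp [hx, List.getD_eq_getElem?_getD]

theorem pvOcc_eq_map (l : List String) (v : String) :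
    pvOcc l v = (pvOccN l v).map (Nat.cast) := by
  induction l using List.reverseRecOn with
  | nil => rfl
  | append_singleton l x ih =>
    rw [pvOcc_snoc, pvOccN_snoc, ih, List.map_append]
    by_cases hx : x == v <;> simp [hx]

theorem pvOccN_length (l : List String) (v : String) :
    (pvOccN l v).length = l.count v := by
  induction l using List.reverseRecOn with
  | nil => rfl
  | append_singleton l x ih =>
    rw [pvOccN_snoc, List.count_append, List.length_append, ih]
    by_cases hx : x == v
    · have : x = v := by simpa using hx
      simp [this]
    · have : ¬ (x = v) := by simpa using hx
      simp [hx, this]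

theorem pvOccN_mem (l : List String) (v : String) (k : Nat) :
    k ∈ pvOccN l v ↔ k < l.length ∧ l.getD k "" = v := by
  simp [pvOccN, List.mem_filter, List.mem_range]

theorem pvOccN_nodup (l : List String) (v : String) : (pvOccN l v).Nodup :=
  (List.nodup_range).filter _

-- position k with prefix count c is the c-th element of its group
theorem pvOccN_getElem_of (l : List String) (v : String) (k : Nat)
    (hk : k < l.length) (hv : l.getD k "" = v) :
    (pvOccN l v)[(l.take k).count v]? = some k := by
  induction l using List.reverseRecOn with
  | nil => simp at hk
  | append_singleton l x ih =>
    rw [pvOccN_snoc]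
    by_cases hkl : k < l.length
    · have hgd : (l ++ [x]).getD k "" = l.getD k "" := by
        simp [List.getD_eq_getElem?_getD, List.getElem?_append_left hkl]
      have htk : (l ++ [x]).take k = l.take k := List.take_append_of_le_length (by omega)
      rw [htk]
      have hsome := ih hkl (by rw [← hgd]; exact hv)
      have hlt : (l.take k).count v < (pvOccN l v).length := by
        by_contra h
        rw [List.getElem?_eq_none (by omega)] at hsome
        simp at hsome
      rw [List.getElem?_append_left hlt]
      exact hsome
    · have hkeq : k = l.length := by
        have : k < (l ++ [x]).length := hk
        simp at this; omega
      subst hkeq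
      have hgx : (l ++ [x]).getD l.length "" = x := by
        simp [List.getD_eq_getElem?_getD]
      have hxv : x = v := by rw [← hgx]; exact hv
      have htk : (l ++ [x]).take l.length = l := by
        simp [List.take_append_of_le_length (l₂ := [x]) (le_refl l.length)]
      rw [htk]
      have hcnt : l.count v = (pvOccN l v).length := (pvOccN_length l v).symm
      rw [hcnt]
      simp [hxv]

theorem pvOccN_getElem_inv (l : List String) (v : String) (c k : Nat)
    (h : (pvOccN l v)[c]? = some k) :
    k < l.length ∧ l.getD k "" = v ∧ (l.take k).count v = c := by
  induction l using List.reverseRecOn with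
  | nil => simp [pvOccN] at h
  | append_singleton l x ih =>
    rw [pvOccN_snoc] at h
    by_cases hc : c < (pvOccN l v).length
    · rw [List.getElem?_append_left hc] at h
      obtain ⟨h1, h2, h3⟩ := ih h
      refine ⟨by simp; omega, ?_, ?_⟩
      · simp [List.getD_eq_getElem?_getD, List.getElem?_append_left h1, ← h2,
          List.getD_eq_getElem?_getD]
      · rw [List.take_append_of_le_length (by omega)]; exact h3
    · by_cases hx : x == v
      · simp only [hx, if_true] at h
        rw [List.getElem?_append_right (by omega)] at h
        have hc0 : c - (pvOccN l v).length = 0 := by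
          by_contra h0
          rw [List.getElem?_eq_none (by simp; omega)] at h
          simp at h
        rw [hc0] at h
        simp at h
        have hxv : x = v := by simpa using hx
        have hkeq : k = l.length := h.symm
        subst hkeq
        refine ⟨by simp, ?_, ?_⟩
        · simp [List.getD_eq_getElem?_getD, hxv]
        · have htk : (l ++ [x]).take l.length = l := by
            simp [List.take_append_of_le_length (l₂ := [x]) (le_refl l.length)]
          rw [htk, ← pvOccN_length l v]
          omega
      · simp only [hx] at h
        rw [List.getElem?_eq_none (by simp; omega)] at h
        simp at h

-- phase 1 of B produces exactly the occurrence groups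
theorem pvPositions_getD (l : List String) (v : String) :
    (((PySem.List.enumerate l 0).foldl
        (fun d p => d.modify p.2 [] (fun old => old ++ [p.1]))
        PySem.Dict.empty).getD v []) = pvOcc l v := by
  have hmap : (PySem.List.enumerate l 0).foldl
        (fun d p => d.modify p.2 [] (fun old => old ++ [p.1])) PySem.Dict.empty
      = ((PySem.List.enumerate l 0).map (fun p => (p.2, p.1))).foldl
        (fun d p => d.modify p.1 [] (fun old => old ++ [p.2])) PySem.Dict.empty := by
    rw [List.foldl_map]
  rw [hmap, PySem.Dict.getD_foldl_modify_append, PySem.Dict.getD_empty]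
  rw [List.filter_map, List.map_map]
  simp [pvOcc, Function.comp_def]

-- ===== B-side: phase 2 (label assignment) =====

theorem pvInsFold_get? (idxs : List Int) (s : String) (lab : PySem.Dict Int String) (j : Int) :
    ((idxs.foldl (fun lab i => lab.insert i s) lab).get? j)
      = if j ∈ idxs then some s else lab.get? j := by
  induction idxs using List.reverseRecOn generalizing lab with
  | nil => simp
  | append_singleton idxs i0 ih =>
    rw [List.foldl_append]
    simp only [List.foldl_cons, List.foldl_nil]
    rw [PySem.Dict.get?_insert, ih]
    by_cases hji : j = i0 <;> by_cases hjm : j ∈ idxs <;> simp [hji, hjm]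

theorem pvEnumFold_get?_of_not_mem (idxs : List Int)
    (lab : PySem.Dict Int String) (j : Int) (hj : j ∉ idxs) :
    (((PySem.List.enumerate idxs 0).foldl
        (fun lab q => lab.insert q.2 (PySem.List.pyGetD pvComps q.1 "")) lab).get? j)
      = lab.get? j := by
  induction idxs using List.reverseRecOn generalizing lab with
  | nil => simp [PySem.List.enumerate_nil]
  | append_singleton idxs i0 ih =>
    rw [show PySem.List.enumerate (idxs ++ [i0]) 0
          = PySem.List.enumerate idxs 0 ++ [((idxs.length : Int), i0)] by
        simp [PySem.List.enumerate_append, PySem.List.enumerate_cons]]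
    rw [List.foldl_append]
    simp only [List.foldl_cons, List.foldl_nil]
    rw [PySem.Dict.get?_insert]
    have hne : j ≠ i0 := fun h => hj (by simp [h])
    rw [if_neg hne]
    exact ih lab (fun h => hj (by simp [h]))

theorem pvEnumFold_get?_of_getElem (idxs : List Int)
    (lab : PySem.Dict Int String) (c : Nat) (j : Int)
    (hnd : idxs.Nodup) (hc : idxs[c]? = some j) :
    (((PySem.List.enumerate idxs 0).foldl
        (fun lab q => lab.insert q.2 (PySem.List.pyGetD pvComps q.1 "")) lab).get? j)
      = some (PySem.List.pyGetD pvComps (c : Int) "") := by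
  induction idxs using List.reverseRecOn generalizing lab with
  | nil => simp at hc
  | append_singleton idxs i0 ih =>
    rw [show PySem.List.enumerate (idxs ++ [i0]) 0
          = PySem.List.enumerate idxs 0 ++ [((idxs.length : Int), i0)] by
        simp [PySem.List.enumerate_append, PySem.List.enumerate_cons]]
    rw [List.foldl_append]
    simp only [List.foldl_cons, List.foldl_nil]
    rw [PySem.Dict.get?_insert]
    have hnd' : idxs.Nodup := hnd.of_append_left
    have hni : i0 ∉ idxs := by
      have := List.disjoint_of_nodup_append hnd
      intro h; exact this h (by simp)
    by_cases hcl : c < idxs.length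
    · rw [List.getElem?_append_left hcl] at hc
      have hjm : j ∈ idxs := List.mem_of_getElem? hc
      rw [if_neg (show j ≠ i0 from fun h => hni (h ▸ hjm))]
      exact ih lab hnd' hc
    · rw [List.getElem?_append_right (by omega)] at hc
      have hc0 : c - idxs.length = 0 := by
        by_contra h0
        rw [List.getElem?_eq_none (by simp; omega)] at hc
        simp at hc
      rw [hc0] at hc
      simp at hc
      have hceq : c = idxs.length := by omega
      subst hceq
      rw [if_pos hc.symm]

-- one group step of phase 2, described pointwise
theorem pvGroup_get? (l : List String) (v : String) (lab : PySem.Dict Int String)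
    (k : Nat) (hk : k < l.length) :
    ((if v = "VERTEX_ATTRIB_UNASSIGNED" then
        (pvOcc l v).foldl (fun lab i => lab.insert i "VERTEX_COMPONENT_UNASSIGNED") lab
      else
        (PySem.List.enumerate ((pvOcc l v).take 4) 0).foldl
          (fun lab q => lab.insert q.2 (PySem.List.pyGetD pvComps q.1 "")) lab).get? (k : Int))
      = if l.getD k "" = v then (pvLab l k).or (lab.get? (k : Int)) else lab.get? (k : Int) := by
  have hmem : ((k : Int) ∈ pvOcc l v) ↔ (k < l.length ∧ l.getD k "" = v) := by
    rw [pvOcc_eq_map]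
    constructor
    · intro h
      obtain ⟨k', hk', he⟩ := List.mem_map.mp h
      have hkk : k' = k := by exact_mod_cast he
      exact hkk ▸ ((pvOccN_mem l v k').mp hk')
    · intro h
      exact List.mem_map.mpr ⟨k, (pvOccN_mem l v k).mpr h, rfl⟩
  by_cases hv : v = "VERTEX_ATTRIB_UNASSIGNED"
  · rw [if_pos hv, pvInsFold_get?]
    by_cases hg : l.getD k "" = v
    · rw [if_pos (hmem.mpr ⟨hk, hg⟩), if_pos hg]
      unfold pvLab
      rw [hg, if_pos hv]
      simp
    · rw [if_neg (fun h => hg (hmem.mp h).2), if_neg hg]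
  · rw [if_neg hv]
    by_cases hg : l.getD k "" = v
    · rw [if_pos hg]
      have hvk : l.getD k "" = v := hg
      by_cases h4 : (l.take k).count v < 4
      · -- k is among the first 4 occurrences: labelled with comps[count]
        have hsome := pvOccN_getElem_of l v k hk hvk
        have htake : ((pvOcc l v).take 4)[(l.take k).count v]? = some (k : Int) := by
          rw [pvOcc_eq_map, ← List.map_take, List.getElem?_map,
            List.getElem?_take_of_lt h4, hsome]
          rfl
        have hnd : ((pvOcc l v).take 4).Nodup := by
          rw [pvOcc_eq_map, ← List.map_take]
          exact ((pvOccN_nodup l v).sublist (List.take_sublist _ _)).map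
            (fun a b h => by exact_mod_cast h)
        rw [pvEnumFold_get?_of_getElem _ _ _ _ hnd htake]
        rw [show pvLab l k = some (pvComps.getD ((l.take k).count v) "") by
          unfold pvLab
          rw [hg, if_neg hv, if_pos h4]]
        simp [PySem.List.pyGetD_natCast]
      · -- 5th or later occurrence: no label, entry untouched
        have hnm : (k : Int) ∉ (pvOcc l v).take 4 := by
          intro hin
          have hin' : (k : Int) ∈ ((pvOccN l v).take 4).map (Nat.cast) := by
            rw [List.map_take, ← pvOcc_eq_map]
            exact hin
          obtain ⟨k', hk', he⟩ := List.mem_map.mp hin'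
          have hkk : k' = k := by exact_mod_cast he
          rw [hkk] at hk'
          obtain ⟨c, hcl, hce⟩ := List.getElem_of_mem hk'
          have hc : ((pvOccN l v).take 4)[c]? = some k := by
            rw [List.getElem?_eq_getElem hcl, hce]
          have hc4 : c < 4 := by
            have h1 := (List.getElem?_eq_some_iff.mp hc).1
            have h2 := List.length_take_le 4 (pvOccN l v)
            omega
          have hocc : (pvOccN l v)[c]? = some k := by
            rw [← List.getElem?_take_of_lt hc4]; exact hc
          have := (pvOccN_getElem_inv l v c k hocc).2.2
          omega
        rw [pvEnumFold_get?_of_not_mem _ _ _ hnm]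
        rw [show pvLab l k = none by
          unfold pvLab
          rw [hg, if_neg hv, if_neg h4]]
        simp
    · rw [if_neg hg]
      have hnm : (k : Int) ∉ (pvOcc l v).take 4 := by
        intro hin
        exact hg (hmem.mp (List.mem_of_mem_take hin)).2
      exact pvEnumFold_get?_of_not_mem _ _ _ hnm

-- chaining phase 2 over all groups
theorem pvChainGroups (l : List String) (gs : List (String × List Int))
    (lab : PySem.Dict Int String) (k : Nat) (hk : k < l.length)
    (hgs : ∀ g ∈ gs, g.2 = pvOcc l g.1) (hnd : (gs.map Prod.fst).Nodup) :
    ((gs.foldl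
        (fun lab g =>
          if g.1 = "VERTEX_ATTRIB_UNASSIGNED" then
            g.2.foldl (fun lab i => lab.insert i "VERTEX_COMPONENT_UNASSIGNED") lab
          else
            (PySem.List.enumerate (g.2.take 4) 0).foldl
              (fun lab q => lab.insert q.2 (PySem.List.pyGetD pvComps q.1 "")) lab) lab).get? (k : Int))
      = if l.getD k "" ∈ gs.map Prod.fst then (pvLab l k).or (lab.get? (k : Int))
        else lab.get? (k : Int) := by
  induction gs generalizing lab with
  | nil => simp
  | cons g rest ih =>
    simp only [List.foldl_cons]
    have hocc : g.2 = pvOcc l g.1 := hgs g (by simp)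
    have hstep := pvGroup_get? l g.1 lab k hk
    rw [hocc]
    have hnd' : (rest.map Prod.fst).Nodup := by
      simpa using hnd.of_cons
    rw [ih _ (fun g' hg' => hgs g' (by simp [hg'])) hnd']
    by_cases hg : l.getD k "" = g.1
    · have hni : g.1 ∉ rest.map Prod.fst := by
        simp only [List.map_cons, List.nodup_cons] at hnd
        exact hnd.1
      rw [if_neg (show l.getD k "" ∉ rest.map Prod.fst by rw [hg]; exact hni), hstep, if_pos hg]
      rw [if_pos (show l.getD k "" ∈ List.map Prod.fst (g :: rest) from by rw [hg]; simp)]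
    · rw [hstep, if_neg hg]
      simp only [List.map_cons, List.mem_cons, hg, false_or]

-- the assembled pointwise description of B's label dict
theorem pvLabels_get? (l : List String) (k : Nat) (hk : k < l.length) :
    (((((PySem.List.enumerate l 0).foldl
        (fun d p => d.modify p.2 [] (fun old => old ++ [p.1])) PySem.Dict.empty)).items.foldl
        (fun lab g =>
          if g.1 = "VERTEX_ATTRIB_UNASSIGNED" then
            g.2.foldl (fun lab i => lab.insert i "VERTEX_COMPONENT_UNASSIGNED") lab
          else
            (PySem.List.enumerate (g.2.take 4) 0).foldl
              (fun lab q => lab.insert q.2 (PySem.List.pyGetD pvComps q.1 "")) lab)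
        PySem.Dict.empty).get? (k : Int))
      = pvLab l k := by
  set positions : PySem.Dict String (List Int) :=
    (PySem.List.enumerate l 0).foldl
      (fun d p => d.modify p.2 [] (fun old => old ++ [p.1])) PySem.Dict.empty with hpos
  have hndk : positions.keys.Nodup := by
    apply PySem.Dict.nodup_keys_foldl_modify_key
    exact PySem.Dict.nodup_keys_empty
  have hitems : ∀ g ∈ positions.items, g.2 = pvOcc l g.1 := by
    intro g hg
    have := PySem.Dict.getD_of_mem_items (d := positions) (k := g.1) (v := g.2) hg hndk (d0 := [])
    rw [← this]
    exact pvPositions_getD l g.1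
  have hfst : positions.items.map Prod.fst = positions.keys := rfl
  have hmemk : l.getD k "" ∈ positions.keys := by
    have hkeys : positions.keys
        = PySem.Set.update (PySem.Dict.empty : PySem.Dict String (List Int)).keys
            ((PySem.List.enumerate l 0).map (fun p => p.2)) := by
      exact PySem.Dict.keys_foldl_modify_key _ _ _ _ _
    rw [hkeys]
    simp only [PySem.Dict.keys_empty, PySem.List.map_snd_enumerate]
    rw [PySem.Set.update_eq_append_filter]
    have hin : l.getD k "" ∈ l := by
      rw [List.getD_eq_getElem l _ hk]; exact List.getElem_mem hk
    simpa [PySem.Set.mem_ofList] using hin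
  rw [pvChainGroups l positions.items PySem.Dict.empty k hk hitems (hfst ▸ hndk)]
  rw [if_pos (hfst ▸ hmemk)]
  simp

-- phase 3: the comprehension turns the label dict into the result list
theorem pvFilterMap_of_pointwise (xs : List Nat) (f : Nat → Option String) :
    (xs.filter (fun k => (f k).isSome)).map (fun k => (f k).getD "") = xs.filterMap f := by
  induction xs with
  | nil => rfl
  | cons x xs ih =>
    cases h : f x <;> simp [h, ih]

theorem pvB_eq_filterMap (l : List String) :
    getAttributesComponents_alt l = (List.range l.length).filterMap (pvLab l) := by
  simp only [getAttributesComponents_alt]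
  set labels : PySem.Dict Int String :=
    (((PySem.List.enumerate l 0).foldl
        (fun d p => d.modify p.2 [] (fun old => old ++ [p.1])) PySem.Dict.empty).items.foldl
      (fun lab g =>
        if g.1 = "VERTEX_ATTRIB_UNASSIGNED" then
          g.2.foldl (fun lab i => lab.insert i "VERTEX_COMPONENT_UNASSIGNED") lab
        else
          (PySem.List.enumerate (g.2.take 4) 0).foldl
            (fun lab q => lab.insert q.2
              (PySem.List.pyGetD ["VERTEX_COMPONENT_X", "VERTEX_COMPONENT_Y",
                "VERTEX_COMPONENT_Z", "VERTEX_COMPONENT_W"] q.1 "")) lab)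
      PySem.Dict.empty) with hlab
  have hpt : ∀ k, k < l.length → labels.get? (k : Int) = pvLab l k := fun k hk =>
    pvLabels_get? l k hk
  rw [PySem.List.pyRange_zero_natCast, List.filter_map, List.map_map]
  rw [show (List.range l.length).filter ((fun i => labels.contains i) ∘ (fun k : Nat => (k : Int)))
        = (List.range l.length).filter (fun k => (pvLab l k).isSome) from
    List.filter_congr (fun k hk => by
      simp only [Function.comp_apply]
      rw [PySem.Dict.contains_eq_isSome_get?, hpt k (List.mem_range.mp hk)])]
  rw [show ((List.range l.length).filter (fun k => (pvLab l k).isSome)).map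
        ((fun i => labels.getD i "") ∘ (fun k : Nat => (k : Int)))
        = ((List.range l.length).filter (fun k => (pvLab l k).isSome)).map
          (fun k => (pvLab l k).getD "") from
    List.map_congr_left (fun k hk => by
      simp only [Function.comp_apply]
      rw [PySem.Dict.getD_eq_get?_getD,
        hpt k (List.mem_range.mp (List.mem_of_mem_filter hk))])]
  exact pvFilterMap_of_pointwise _ _

-- ===== VERDICT (by name: the statement is the Claim_ definition above) =====
theorem getAttributesComponents_spec : Claim_equal_getAttributesComponents := by
  intro attributes _
  unfold Spec_getAttributesComponents
  rw [pvA_eq_filterMap, pvB_eq_filterMap]
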